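-- pv_equiv track=rewrite | github.com/TonyCSB/AdventOfCode2024 | 1/run.py | calculate_simlilarity_score
-- ===== SOURCE A (Python) =====
-- def calculate_simlilarity_score(first: list[int], second: list[int]) -> int:
--     """Calculate similarity score between the list"""
--     score = 0
--     cache = {}
--
--     for v in first:
--         if v in cache:
--             score += cache[v]
--         else:
--             s = second.count(v) * v
--             cache[v] = s
--             score += s
--
--     return score
-- ===== SOURCE B (Python) =====
-- def calculate_simlilarity_score(first: list[int], second: list[int]) -> int:
--     """Calculate similarity score between the list"""
--     cf = {}
--     for v in first:
--         cf[v] = cf.get(v, 0) + 1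
--     cs = {}
--     for v in second:
--         cs[v] = cs.get(v, 0) + 1
--     return sum(v * c * cs.get(v, 0) for v, c in cf.items())
-- ===== Notes on version B (the rewrite author's own statement) =====
-- stated objective: alternative
-- what changed: Replaces the per-element memoized second.count scan with one-pass frequency tables of both lists and a sum of v*cf[v]*cs[v] over the distinct values of first.
import Mathlib
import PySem

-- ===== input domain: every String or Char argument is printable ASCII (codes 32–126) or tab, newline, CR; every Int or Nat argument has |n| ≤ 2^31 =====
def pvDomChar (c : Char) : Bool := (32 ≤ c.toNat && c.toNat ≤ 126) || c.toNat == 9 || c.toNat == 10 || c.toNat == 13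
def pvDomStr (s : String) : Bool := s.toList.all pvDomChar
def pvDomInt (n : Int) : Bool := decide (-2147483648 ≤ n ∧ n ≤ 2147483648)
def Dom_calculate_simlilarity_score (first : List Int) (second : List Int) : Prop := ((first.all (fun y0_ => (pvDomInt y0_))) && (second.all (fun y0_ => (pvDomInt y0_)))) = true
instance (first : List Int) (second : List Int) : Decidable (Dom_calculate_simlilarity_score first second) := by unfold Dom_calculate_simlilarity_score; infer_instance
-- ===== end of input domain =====

-- B replaces A's per-element memoized second.count scan by one-pass frequency tables
-- of both lists combined over the distinct values of `first` (alternative algorithm).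


-- ===== PORT A =====
-- score/cache loop: memoize second.count(v)*v per value of `first`
def calculate_simlilarity_score (first : List Int) (second : List Int) : Int :=
  (first.foldl
    (fun (st : Int × PySem.Dict Int Int) v =>
      if st.2.contains v then
        (st.1 + st.2.getD v 0, st.2)
      else
        let s : Int := (PySem.List.count second v : Int) * v
        (st.1 + s, st.2.insert v s))
    (0, PySem.Dict.empty)).1

-- ===== PORT B =====
def calculate_simlilarity_score_alt (first : List Int) (second : List Int) : Int :=
  let cf := first.foldl (fun (d : PySem.Dict Int Int) v => d.insert v (d.getD v 0 + 1)) PySem.Dict.empty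
  let cs := second.foldl (fun (d : PySem.Dict Int Int) v => d.insert v (d.getD v 0 + 1)) PySem.Dict.empty
  (cf.items.map (fun p => p.1 * p.2 * cs.getD p.1 0)).sum

-- ===== PRECONDITION & SPEC =====
def Spec_calculate_simlilarity_score (first : List Int) (second : List Int) (out : Int) : Prop := out = calculate_simlilarity_score_alt first second
instance (first : List Int) (second : List Int) (out : Int) : Decidable (Spec_calculate_simlilarity_score first second out) := by unfold Spec_calculate_simlilarity_score; infer_instance

-- ===== CLAIM (what is proved, stated in full; the proofs are below) =====
def Claim_equal_calculate_simlilarity_score : Prop := ∀ (first : List Int) (second : List Int), Dom_calculate_simlilarity_score first second → Spec_calculate_simlilarity_score first second (calculate_simlilarity_score first second)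

-- ===== LEMMAS AND PROOFS =====

-- A's loop invariant: if every cached value is second.count(k)*k, the loop adds Σ_{v ∈ rest} second.count(v)*v.
theorem calcA_invariant (second : List Int) :
    ∀ (rest : List Int) (score : Int) (cache : PySem.Dict Int Int),
      (∀ k s, cache.get? k = some s → s = (PySem.List.count second k : Int) * k) →
      (rest.foldl
        (fun (st : Int × PySem.Dict Int Int) v =>
          if st.2.contains v then
            (st.1 + st.2.getD v 0, st.2)
          else
            let s : Int := (PySem.List.count second v : Int) * v
            (st.1 + s, st.2.insert v s))
        (score, cache)).1
      = score + (rest.map (fun v => (PySem.List.count second v : Int) * v)).sum := by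
  intro rest
  induction rest with
  | nil => intro score cache _; simp
  | cons v t ih =>
    intro score cache hinv
    simp only [List.foldl_cons, List.map_cons, List.sum_cons]
    by_cases hc : cache.contains v = true
    · rw [if_pos hc]
      have hget : ∃ s, cache.get? v = some s := by
        rcases h : cache.get? v with _ | s
        · rw [PySem.Dict.get?_eq_none_iff_contains] at h; simp [h] at hc
        · exact ⟨s, rfl⟩
      rcases hget with ⟨s, hs⟩
      have hval := hinv v s hs
      have hgd : cache.getD v 0 = s := by simp [PySem.Dict.getD, hs]
      rw [hgd, hval, ih _ _ hinv]; ring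
    · rw [if_neg hc]
      rw [ih]
      · ring
      · intro k s hks
        by_cases hk : k = v
        · subst hk
          rw [PySem.Dict.get?_insert_self] at hks
          exact (Option.some_inj.mp hks).symm
        · rw [PySem.Dict.get?_insert_of_ne _ _ hk] at hks
          exact hinv k s hks

-- PySem.List.count is Mathlib's List.count with arguments flipped.
theorem pycount_eq (xs : List Int) (v : Int) : PySem.List.count xs v = List.count v xs := by
  simp [PySem.List.count]

-- B unfolded through the counter lemmas.
theorem calcB_eq (first second : List Int) :
    calculate_simlilarity_score_alt first second
      = ((PySem.Set.ofList first).map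
          (fun k => k * (List.count k first : Int) * (List.count k second : Int))).sum := by
  unfold calculate_simlilarity_score_alt
  simp only [PySem.Dict.foldl_insert_getD_add_one_eq_counter, PySem.Dict.items_counter,
    List.map_map]
  simp [Function.comp_def, PySem.Dict.getD_counter]

theorem toFinset_ofList (xs : List Int) : (PySem.Set.ofList xs).toFinset = xs.toFinset := by
  ext y; simp [PySem.Set.mem_ofList]

-- ===== VERDICT (by name: the statement is the Claim_ definition above) =====
theorem calculate_simlilarity_score_spec : Claim_equal_calculate_simlilarity_score := by
  intro first second _
  unfold Spec_calculate_simlilarity_score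
  unfold calculate_simlilarity_score
  rw [calcA_invariant second first 0 PySem.Dict.empty (by intro k s h; simp [PySem.Dict.get?, PySem.Dict.empty] at h)]
  rw [calcB_eq, zero_add]
  have hB := List.sum_toFinset
    (fun k => k * (List.count k first : Int) * (List.count k second : Int))
    (PySem.Set.nodup_ofList first)
  rw [← hB, toFinset_ofList]
  have hA := Finset.sum_list_map_count first (fun v => (PySem.List.count second v : Int) * v)
  rw [hA]
  apply Finset.sum_congr rfl
  intro m _
  rw [pycount_eq]
  simp only [nsmul_eq_mul]
  ring
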